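-- pv_equiv track=rewrite | github.com/d0gyunkim/uniroad_project | core/chunker.py | extract_table_markdown
-- ===== SOURCE A (Python) =====
-- def extract_table_markdown(markdown_text: str, summary_end_pos: int) -> str:
--     """
--     <table_summary> 태그 다음에 오는 표의 마크다운 추출
--
--     Args:
--         markdown_text: 전체 마크다운 텍스트
--         summary_end_pos: <table_summary> 태그의 끝 위치
--
--     Returns:
--         표의 마크다운 텍스트
--     """
--     # summary 태그 다음 부분부터 시작
--     remaining_text = markdown_text[summary_end_pos:]
--
--     # 표 시작 패턴 찾기 (| 로 시작하는 줄)
--     lines = remaining_text.split('\n')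
--     table_lines = []
--     in_table = False
--
--     for line in lines:
--         stripped = line.strip()
--
--         # 표 시작: | 로 시작하는 줄
--         if '|' in stripped and not in_table:
--             in_table = True
--             table_lines.append(line)
--         # 표 계속: | 가 있거나 빈 줄
--         elif in_table:
--             if '|' in stripped or stripped == '':
--                 table_lines.append(line)
--             else:
--                 # 표 종료
--                 break
--
--     return '\n'.join(table_lines).strip()
-- ===== SOURCE B (Python) =====
-- def extract_table_markdown(markdown_text: str, summary_end_pos: int) -> str:
--     lines = markdown_text[summary_end_pos:].split('\n')
--     start = next((i for i, l in enumerate(lines) if '|' in l.strip()), len(lines))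
--     table = []
--     for line in lines[start:]:
--         if '|' in line.strip() or line.strip() == '':
--             table.append(line)
--         else:
--             break
--     return '\n'.join(table).strip()
-- ===== Notes on version B (the rewrite author's own statement) =====
-- stated objective: alternative
-- what changed: Replaced the single flag-driven loop with two phases: find the index of the first line whose stripped form contains '|', then take the contiguous table prefix from there; no in_table state variable.
import Mathlib
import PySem

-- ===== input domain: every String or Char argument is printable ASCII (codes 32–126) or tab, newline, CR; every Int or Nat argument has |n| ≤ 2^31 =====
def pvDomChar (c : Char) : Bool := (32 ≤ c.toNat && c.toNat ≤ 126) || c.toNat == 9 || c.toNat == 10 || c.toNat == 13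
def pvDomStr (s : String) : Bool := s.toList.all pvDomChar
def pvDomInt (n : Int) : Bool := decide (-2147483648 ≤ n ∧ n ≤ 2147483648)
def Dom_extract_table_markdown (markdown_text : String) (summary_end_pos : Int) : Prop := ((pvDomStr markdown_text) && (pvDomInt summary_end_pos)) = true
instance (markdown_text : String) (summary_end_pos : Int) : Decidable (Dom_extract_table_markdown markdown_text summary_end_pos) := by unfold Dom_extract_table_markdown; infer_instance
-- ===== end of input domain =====

-- B replaces A's flag-driven single loop by two phases (find the table's start index, then take its
-- contiguous prefix); proved to return the same string on every input (objective: alternative).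

-- ===== PORT A =====
-- A's loop: flag in_table, append while '|' in stripped or (once in table) blank, break otherwise
def pvLoopA : List String → Bool → List String
  | [], _ => []
  | line :: rest, in_table =>
    let stripped := PySem.Str.strip line
    if PySem.Str.isIn "|" stripped && !in_table then
      line :: pvLoopA rest true
    else if in_table then
      if PySem.Str.isIn "|" stripped || stripped == "" then
        line :: pvLoopA rest in_table
      else
        []  -- break
    else
      pvLoopA rest in_table

def extract_table_markdown (markdown_text : String) (summary_end_pos : Int) : String :=
  let remaining_text := PySem.Str.slice markdown_text (some summary_end_pos) none
  let lines := (PySem.Str.split? remaining_text "\n").getD []  -- sep "\n" ≠ "": split? is some; exact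
  let table_lines := pvLoopA lines false
  PySem.Str.strip (PySem.Str.join "\n" table_lines)

-- ===== PORT B =====
def extract_table_markdown_alt (markdown_text : String) (summary_end_pos : Int) : String :=
  let lines := (PySem.Str.split? (PySem.Str.slice markdown_text (some summary_end_pos) none) "\n").getD []
  let start := lines.findIdx (fun l => PySem.Str.isIn "|" (PySem.Str.strip l))
  let table := (lines.drop start).takeWhile
      (fun l => PySem.Str.isIn "|" (PySem.Str.strip l) || PySem.Str.strip l == "")
  PySem.Str.strip (PySem.Str.join "\n" table)

-- ===== PRECONDITION & SPEC =====
def Spec_extract_table_markdown (markdown_text : String) (summary_end_pos : Int) (out : String) : Prop := out = extract_table_markdown_alt markdown_text summary_end_pos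
instance (markdown_text : String) (summary_end_pos : Int) (out : String) : Decidable (Spec_extract_table_markdown markdown_text summary_end_pos out) := by unfold Spec_extract_table_markdown; infer_instance

-- ===== CLAIM (what is proved, stated in full; the proofs are below) =====
def Claim_equal_extract_table_markdown : Prop := ∀ (markdown_text : String) (summary_end_pos : Int), Dom_extract_table_markdown markdown_text summary_end_pos → Spec_extract_table_markdown markdown_text summary_end_pos (extract_table_markdown markdown_text summary_end_pos)

-- ===== LEMMAS AND PROOFS =====
theorem pvLoopA_true (ls : List String) :
    pvLoopA ls true
      = ls.takeWhile (fun l => PySem.Str.isIn "|" (PySem.Str.strip l) || PySem.Str.strip l == "") := by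
  induction ls with
  | nil => rfl
  | cons l rest ih =>
    by_cases hIn : PySem.Chars.isIn ['|'] (PySem.Chars.strip l.toList) = true
    · simp [pvLoopA, hIn, ih]
    · by_cases hEq : PySem.Str.strip l = ""
      · simp [pvLoopA, hIn, hEq, ih]
      · simp [pvLoopA, hIn, hEq]

theorem pvLoopA_false (ls : List String) :
    pvLoopA ls false
      = (ls.drop (ls.findIdx (fun l => PySem.Str.isIn "|" (PySem.Str.strip l)))).takeWhile
          (fun l => PySem.Str.isIn "|" (PySem.Str.strip l) || PySem.Str.strip l == "") := by
  induction ls with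
  | nil => rfl
  | cons l rest ih =>
    by_cases hIn : PySem.Chars.isIn ['|'] (PySem.Chars.strip l.toList) = true
    · simp [pvLoopA, List.findIdx_cons, hIn, pvLoopA_true]
    · simp [pvLoopA, List.findIdx_cons, hIn, ih]

-- ===== VERDICT (by name: the statement is the Claim_ definition above) =====
theorem extract_table_markdown_spec : Claim_equal_extract_table_markdown := by
  intro md pos _
  unfold Spec_extract_table_markdown extract_table_markdown extract_table_markdown_alt
  simp only [pvLoopA_false]
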